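-- pv_equiv track=rewrite | github.com/mirceamaierean/ubb | 1st Semester/Computational Logic/Conversions optional homework/src/functions.py | add_2_numbers_in_base_p
-- ===== SOURCE A (Python) =====
-- def add_2_numbers_in_base_p(a, b, p):
--   """
--   a: string
--   b: string
--   p: integer
--   list_of_digits contains all the suitable digits that can be found in the bases we work with
--   It's easier for us to store the numbers a and b as strings, because we will work with the last digit, one by one
--   """
--   list_of_digits = ['0', '1', '2', '3', '4', '5', '6', '7', '8', '9', 'A', 'B', 'C', 'D', 'E', 'F']
--   a_index = len(a) - 1
--   b_index = len(b) - 1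
--
--   '''
--   We initialize a value for the remainder, that will be updated by case
--   '''
--   remainder = 0
--
--   result = ""
--
--   while a_index >= 0 or b_index >= 0:
--     '''
--     We take the digits, pair by pair, of our numbers. Since them are strings, we can find them by the corresponding index. From each one of the numbers, we take the digits as long as their corresponding indexes are non negative numbers
--     '''
--
--     digit_of_a = 0;
--     if a_index >= 0:
--       '''
--       The corresponding value in base 10 is the index of our list_of_digits list
--       '''
--       digit_of_a = list_of_digits.index(a[a_index])
--       a_index -= 1
--
--     digit_of_b = 0;
--     if b_index >= 0:
--       digit_of_b = list_of_digits.index(b[b_index])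
--       b_index -= 1
--
--     '''
--     We add digits of a, digit of b, and the remainder, we compute the modulus value in base b, and the corresponding digit will be in the list_of_digits at the position of our result
--     After that, the remainder has to be updated, for the future additions, and that value will be the quotient of the division by p
--     EG:
--     digit_of_a = 7, digits_of_b = 8, remainder = 1, p = 16;
--     current_digitst = list_of_digits[(7 + 8 + 1) % 16] = list_of_digits[16 % 16] = list_of_digits[0] = '0'
--     remainder = (7 + 8 + 1) / 16 = 16 / 16 = 1
--     '''
--     current_digit_of_number = list_of_digits[(digit_of_a + digit_of_b + remainder) % p]
--     remainder = (digit_of_a + digit_of_b + remainder) // p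
--
--     '''
--     We add the digit at the front of our result
--     '''
--     result = current_digit_of_number + result
--
--   '''
--   If the remainder is different to 0, we have to add the digit at the front of our result
--   '''
--   if remainder > 0:
--     current_digit_of_number = list_of_digits[remainder]
--     result = current_digit_of_number + result
--
--   return result
-- ===== SOURCE B (Python) =====
-- def add_2_numbers_in_base_p(a, b, p):
--   list_of_digits = ['0', '1', '2', '3', '4', '5', '6', '7', '8', '9', 'A', 'B', 'C', 'D', 'E', 'F']
--   total = 0
--   for ch in a:
--     total = total * p + list_of_digits.index(ch)
--   value_b = 0
--   for ch in b:
--     value_b = value_b * p + list_of_digits.index(ch)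
--   total += value_b
--   out = ""
--   for _ in range(max(len(a), len(b))):
--     total, r = divmod(total, p)
--     out = list_of_digits[r] + out
--   if total > 0:
--     out = list_of_digits[total] + out
--   return out
-- ===== Notes on version B (the rewrite author's own statement) =====
-- stated objective: alternative
-- what changed: Replaces the paired right-to-left digit-by-digit carry loop by decode-to-integer (Horner over base p), one integer addition, and a fixed-width re-encode pass of max(len(a),len(b)) divmod steps plus the leftover carry as one final digit.
-- outside the precondition, e.g. on add_2_numbers_in_base_p('9', '', 2): A returns '41', B returns '41'; on add_2_numbers_in_base_p('9', '8', 17): A returns '10', B returns '10'; on add_2_numbers_in_base_p('7', '7', -17): A returns 'D', B returns 'D'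
import Mathlib
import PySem

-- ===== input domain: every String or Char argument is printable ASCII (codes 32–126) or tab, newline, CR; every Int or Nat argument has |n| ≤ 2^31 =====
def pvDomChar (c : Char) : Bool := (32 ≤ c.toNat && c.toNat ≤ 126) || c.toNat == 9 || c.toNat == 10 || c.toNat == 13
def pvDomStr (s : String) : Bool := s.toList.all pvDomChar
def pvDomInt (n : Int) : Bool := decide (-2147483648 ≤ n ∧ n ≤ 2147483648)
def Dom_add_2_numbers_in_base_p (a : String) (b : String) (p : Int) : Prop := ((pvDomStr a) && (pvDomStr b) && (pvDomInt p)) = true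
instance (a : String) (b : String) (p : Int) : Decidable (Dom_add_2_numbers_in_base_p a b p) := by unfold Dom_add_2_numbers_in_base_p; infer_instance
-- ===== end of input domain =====

-- B replaces A's paired digit-by-digit carry loop by decode-to-integer (Horner), integer addition,
-- and a fixed-width divmod re-encode pass (plus the leftover carry as one digit); alternative decomposition.


-- ===== PORT A =====
def pvDigitsA : List Char :=
  ['0', '1', '2', '3', '4', '5', '6', '7', '8', '9', 'A', 'B', 'C', 'D', 'E', 'F']

-- the while loop of A; state (a_index, b_index, remainder, result); returns (result, remainder).
-- list.index / digits[...] are ported via PySem.List.index? / pyGet? with a junk default (`.getD`):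
-- inside Pre_ they are always `some`, so the default is never used.
def pvALoop (a b : List Char) (p : Int) (ai bi rem : Int) (result : List Char) :
    List Char × Int :=
  if ai ≥ 0 ∨ bi ≥ 0 then
    let da : Int := if ai ≥ 0 then
        (((PySem.List.index? pvDigitsA ((PySem.List.pyGet? a ai).getD ' ')).getD 0 : Nat) : Int)
      else 0
    let ai' : Int := if ai ≥ 0 then ai - 1 else ai
    let db : Int := if bi ≥ 0 then
        (((PySem.List.index? pvDigitsA ((PySem.List.pyGet? b bi).getD ' ')).getD 0 : Nat) : Int)
      else 0
    let bi' : Int := if bi ≥ 0 then bi - 1 else bi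
    let cur : Char := (PySem.List.pyGet? pvDigitsA (PySem.Int.mod (da + db + rem) p)).getD ' '
    pvALoop a b p ai' bi' (PySem.Int.floordiv (da + db + rem) p) (cur :: result)
  else (result, rem)
termination_by (ai + 1).toNat + (bi + 1).toNat
decreasing_by
  split <;> split <;> omega

def add_2_numbers_in_base_p (a : String) (b : String) (p : Int) : String :=
  let r := pvALoop a.toList b.toList p ((a.toList.length : Int) - 1) ((b.toList.length : Int) - 1) 0 []
  if r.2 > 0 then
    String.mk (((PySem.List.pyGet? pvDigitsA r.2).getD ' ') :: r.1)
  else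
    String.mk r.1

-- ===== PORT B =====
def pvDigitsB : List Char :=
  ['0', '1', '2', '3', '4', '5', '6', '7', '8', '9', 'A', 'B', 'C', 'D', 'E', 'F']

-- Horner decode: total = total * p + list_of_digits.index(ch), over the string left to right
def pvHorner (p : Int) (cs : List Char) : Int :=
  cs.foldl (fun v c => v * p + (((PySem.List.index? pvDigitsB c).getD 0 : Nat) : Int)) 0

-- the for-loop of B: w iterations of 'total, r = divmod(total, p); out = digits[r] + out'
def pvBLoop (p : Int) (w : Nat) (total : Int) (out : List Char) : List Char × Int :=
  match w with
  | 0 => (out, total)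
  | Nat.succ w' =>
      pvBLoop p w' (PySem.Int.floordiv total p)
        (((PySem.List.pyGet? pvDigitsB (PySem.Int.mod total p)).getD ' ') :: out)

def add_2_numbers_in_base_p_alt (a : String) (b : String) (p : Int) : String :=
  let total := pvHorner p a.toList
  let value_b := pvHorner p b.toList
  let total := total + value_b
  let r := pvBLoop p (max a.toList.length b.toList.length) total []
  if r.2 > 0 then
    String.mk (((PySem.List.pyGet? pvDigitsB r.2).getD ' ') :: r.1)
  else
    String.mk r.1

-- ===== PRECONDITION & SPEC =====
def pvBase : List Char :=
  ['0', '1', '2', '3', '4', '5', '6', '7', '8', '9', 'A', 'B', 'C', 'D', 'E', 'F']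

-- Pre_ admits only hexadecimal digit strings and p ≠ 0, and for each base range a closed-form
-- digit/length bound under which no digit index ever leaves list_of_digits, so A never raises
-- (outside these bounds A raises ValueError/IndexError/ZeroDivisionError on some inputs; where
-- A still returns — e.g. digits ≥ p, or p < -16 — B returns the same string, the exclusion is
-- only a conservative no-raise bound).
def Pre_add_2_numbers_in_base_p (a : String) (b : String) (p : Int) : Prop :=
  (a.toList.all (fun c => c ∈ pvBase)) = true ∧ (b.toList.all (fun c => c ∈ pvBase)) = true ∧
  ((3 ≤ p ∧ p ≤ 16)
   ∨ ((p = 2 ∨ (-16 ≤ p ∧ p ≤ -2)) ∧ (a.toList.all (fun c => c ∈ pvBase.take 8)) = true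
        ∧ (b.toList.all (fun c => c ∈ pvBase.take 8)) = true)
   ∨ (p = -1 ∧ (a.toList.all (fun c => c ∈ pvBase.take 8)) = true
        ∧ (b.toList.all (fun c => c ∈ pvBase.take 8)) = true
        ∧ a.toList.length ≤ 2 ∧ b.toList.length ≤ 2)
   ∨ (p = 1 ∧ (a.toList.all (fun c => c ∈ pvBase.take 8)) = true
        ∧ (b.toList.all (fun c => c ∈ pvBase.take 8)) = true
        ∧ a.toList.length ≤ 1 ∧ b.toList.length ≤ 1)
   ∨ (17 ≤ p ∧ ((a.toList.reverse.zip b.toList.reverse).all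
        (fun cd => ((PySem.List.index? pvBase cd.1).getD 0 : Nat)
          + ((PySem.List.index? pvBase cd.2).getD 0 : Nat) ≤ 15)) = true))
instance (a : String) (b : String) (p : Int) : Decidable (Pre_add_2_numbers_in_base_p a b p) := by
  unfold Pre_add_2_numbers_in_base_p; infer_instance

def pvWitness_add_2_numbers_in_base_p : String × String × Int := ("FF", "1", 16)

def Spec_add_2_numbers_in_base_p (a : String) (b : String) (p : Int) (out : String) : Prop :=
  out = add_2_numbers_in_base_p_alt a b p
instance (a : String) (b : String) (p : Int) (out : String) : Decidable (Spec_add_2_numbers_in_base_p a b p out) := by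
  unfold Spec_add_2_numbers_in_base_p; infer_instance

-- ===== CLAIM (what is proved, stated in full; the proofs are below) =====
def Claim_equal_add_2_numbers_in_base_p : Prop := ∀ (a : String) (b : String) (p : Int), Dom_add_2_numbers_in_base_p a b p → Pre_add_2_numbers_in_base_p a b p → Spec_add_2_numbers_in_base_p a b p (add_2_numbers_in_base_p a b p)

-- ===== LEMMAS AND PROOFS =====

-- digit value of a character (proof-side shorthand; both ports' digit lists equal pvBase by rfl)
def pvDv (c : Char) : Int := ((PySem.List.index? pvBase c).getD 0 : Nat)

-- digit character of a value
def pvDig (v : Int) : Char := (PySem.List.pyGet? pvBase v).getD ' '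

-- value of a digit list, least-significant digit FIRST
def pvW (p : Int) : List Char → Int
  | [] => 0
  | c :: t => pvDv c + p * pvW p t

-- the common result shape: the n low-order base-p columns of v, then the leftover carry if positive
def pvEncW (p : Int) : Nat → Int → List Char
  | 0, v => if 0 < v then [pvDig v] else []
  | n + 1, v => pvEncW p n (PySem.Int.floordiv v p) ++ [pvDig (PySem.Int.mod v p)]

theorem pv_dvA_eq (c : Char) :
    (((PySem.List.index? pvDigitsA c).getD 0 : Nat) : Int) = pvDv c := rfl

theorem pv_digA_eq (v : Int) : (PySem.List.pyGet? pvDigitsA v).getD ' ' = pvDig v := rfl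

theorem pv_digB_eq (v : Int) : (PySem.List.pyGet? pvDigitsB v).getD ' ' = pvDig v := rfl

-- peeling one column off pvEncW (Python's % and // drop a multiple of p for ANY p ≠ 0)
theorem pvEncW_step {p : Int} (hp : p ≠ 0) (n : Nat) (s t : Int) :
    pvEncW p (n + 1) (s + p * t) =
      pvEncW p n (t + PySem.Int.floordiv s p) ++ [pvDig (PySem.Int.mod s p)] := by
  simp only [pvEncW, PySem.Int.mod, PySem.Int.floordiv, Int.add_mul_fmod_self_left,
    Int.add_mul_fdiv_left s t hp]
  rw [add_comm (s.fdiv p) t]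

-- the common closing shape of every recursive case of the loop lemma
theorem pv_step_goal {p : Int} (hp : p ≠ 0) (n : Nat) (X s V : Int) (res : List Char)
    (hV : V = s + p * X) :
    pvEncW p n (X + PySem.Int.floordiv s p) ++
        ((PySem.List.pyGet? pvDigitsA (PySem.Int.mod s p)).getD ' ' :: res)
      = pvEncW p (n + 1) V ++ res := by
  subst hV
  rw [pvEncW_step hp, pv_digA_eq]
  simp [List.append_assoc]

-- Horner (most-significant digit first) computes pvW of the reversed digit list
theorem pvHorner_eq (p : Int) (cs : List Char) : pvHorner p cs = pvW p cs.reverse := by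
  induction cs using List.reverseRecOn with
  | nil => simp [pvHorner, pvW]
  | append_singleton t x ih =>
    simp only [pvHorner, List.foldl_append, List.foldl_cons, List.foldl_nil,
      List.reverse_append, List.reverse_singleton, List.singleton_append, pvW]
    rw [← pvHorner, ih]
    have : (((PySem.List.index? pvDigitsB x).getD 0 : Nat) : Int) = pvDv x := rfl
    rw [this]; ring

-- A's loop, followed by A's trailing carry-digit step, writes pvEncW of the running value
theorem pvALoop_spec (a b : List Char) (p : Int) (hp : p ≠ 0) :
    ∀ m n, m ≤ a.length → n ≤ b.length → ∀ (rem : Int), ∀ (res : List Char),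
    (if (pvALoop a b p ((m : Int) - 1) ((n : Int) - 1) rem res).2 > 0 then
        pvDig (pvALoop a b p ((m : Int) - 1) ((n : Int) - 1) rem res).2 ::
          (pvALoop a b p ((m : Int) - 1) ((n : Int) - 1) rem res).1
      else (pvALoop a b p ((m : Int) - 1) ((n : Int) - 1) rem res).1)
    = pvEncW p (max m n) (pvW p (a.take m).reverse + pvW p (b.take n).reverse + rem) ++ res := by
  intro m
  induction m with
  | zero =>
    intro n
    induction n with
    | zero =>
      intro _ _ rem res
      rw [pvALoop.eq_def,
        if_neg (show ¬(((0:Nat):Int) - 1 ≥ 0 ∨ ((0:Nat):Int) - 1 ≥ 0) by omega)]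
      simp only [List.take_zero, List.reverse_nil, Nat.max_self]
      simp only [pvW, pvEncW]
      split_ifs <;> first | omega | simp
    | succ n ihn =>
      intro hm hn rem res
      have hnl : n < b.length := by omega
      rw [pvALoop.eq_def,
        if_pos (show (((0:Nat):Int) - 1 ≥ 0 ∨ ((n+1:Nat):Int) - 1 ≥ 0) by omega)]
      dsimp only
      rw [if_neg (show ¬(((0:Nat):Int) - 1 ≥ 0) by omega),
        if_neg (show ¬(((0:Nat):Int) - 1 ≥ 0) by omega),
        if_pos (show ((n+1 : Nat) : Int) - 1 ≥ 0 by omega),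
        if_pos (show ((n+1 : Nat) : Int) - 1 ≥ 0 by omega)]
      rw [show ((n+1 : Nat) : Int) - 1 = ((n : Nat) : Int) from by push_cast; ring]
      rw [PySem.List.pyGet?_natCast, List.getElem?_eq_getElem hnl, Option.getD_some, pv_dvA_eq]
      rw [ihn hm (by omega)]
      rw [List.take_succ, List.getElem?_eq_getElem hnl]
      simp only [List.take_zero, List.reverse_nil, Option.toList_some, List.reverse_append,
        List.reverse_cons, List.reverse_nil, List.nil_append, List.singleton_append,
        Nat.zero_max]
      simp only [pvW]
      apply pv_step_goal hp
      ring
  | succ m ihm =>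
    intro n
    cases n with
    | zero =>
      intro hm hn rem res
      have hal : m < a.length := by omega
      rw [pvALoop.eq_def,
        if_pos (show (((m+1:Nat):Int) - 1 ≥ 0 ∨ ((0:Nat):Int) - 1 ≥ 0) by omega)]
      dsimp only
      rw [if_pos (show ((m+1 : Nat) : Int) - 1 ≥ 0 by omega),
        if_pos (show ((m+1 : Nat) : Int) - 1 ≥ 0 by omega),
        if_neg (show ¬(((0:Nat):Int) - 1 ≥ 0) by omega),
        if_neg (show ¬(((0:Nat):Int) - 1 ≥ 0) by omega)]
      rw [show ((m+1 : Nat) : Int) - 1 = ((m : Nat) : Int) from by push_cast; ring]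
      rw [PySem.List.pyGet?_natCast, List.getElem?_eq_getElem hal, Option.getD_some, pv_dvA_eq]
      rw [ihm 0 (by omega) (by omega)]
      rw [List.take_succ, List.getElem?_eq_getElem hal]
      simp only [List.take_zero, List.reverse_nil, Option.toList_some, List.reverse_append,
        List.reverse_cons, List.reverse_nil, List.nil_append, List.singleton_append,
        Nat.max_zero, add_zero]
      simp only [pvW]
      apply pv_step_goal hp
      ring
    | succ n =>
      intro hm hn rem res
      have hal : m < a.length := by omega
      have hnl : n < b.length := by omega
      rw [pvALoop.eq_def,
        if_pos (show (((m+1:Nat):Int) - 1 ≥ 0 ∨ ((n+1:Nat):Int) - 1 ≥ 0) by omega)]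
      dsimp only
      rw [if_pos (show ((m+1 : Nat) : Int) - 1 ≥ 0 by omega),
        if_pos (show ((m+1 : Nat) : Int) - 1 ≥ 0 by omega),
        if_pos (show ((n+1 : Nat) : Int) - 1 ≥ 0 by omega),
        if_pos (show ((n+1 : Nat) : Int) - 1 ≥ 0 by omega)]
      rw [show ((m+1 : Nat) : Int) - 1 = ((m : Nat) : Int) from by push_cast; ring]
      rw [show ((n+1 : Nat) : Int) - 1 = ((n : Nat) : Int) from by push_cast; ring]
      rw [PySem.List.pyGet?_natCast, PySem.List.pyGet?_natCast,
        List.getElem?_eq_getElem hal, List.getElem?_eq_getElem hnl,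
        Option.getD_some, Option.getD_some, pv_dvA_eq, pv_dvA_eq]
      rw [ihm n (by omega) (by omega)]
      rw [List.take_succ, List.take_succ, List.getElem?_eq_getElem hal, List.getElem?_eq_getElem hnl]
      simp only [Option.toList_some, List.reverse_append, List.reverse_cons, List.reverse_nil,
        List.nil_append, List.singleton_append, Nat.succ_max_succ]
      simp only [pvW]
      apply pv_step_goal hp
      ring

-- B's width loop, followed by B's trailing carry-digit step, writes the same pvEncW shape
theorem pvBLoop_spec (p : Int) :
    ∀ (w : Nat) (v : Int) (res : List Char),
    (if (pvBLoop p w v res).2 > 0 then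
        pvDig (pvBLoop p w v res).2 :: (pvBLoop p w v res).1
      else (pvBLoop p w v res).1)
    = pvEncW p w v ++ res := by
  intro w
  induction w with
  | zero =>
    intro v res
    simp only [pvBLoop, pvEncW]
    split_ifs <;> first | omega | simp
  | succ w ih =>
    intro v res
    simp only [pvBLoop, pvEncW, pv_digB_eq]
    rw [ih]
    simp [List.append_assoc]

-- ===== VERDICT (by name: the statement is the Claim_ definition above) =====
theorem add_2_numbers_in_base_p_spec : Claim_equal_add_2_numbers_in_base_p := by
  unfold Claim_equal_add_2_numbers_in_base_p
  intro a b p _ hpre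
  have hp : p ≠ 0 := by
    obtain ⟨-, -, h⟩ := hpre
    rcases h with h | h | h | h | h <;> omega
  unfold Spec_add_2_numbers_in_base_p add_2_numbers_in_base_p add_2_numbers_in_base_p_alt
  dsimp only
  rw [pv_digA_eq, pv_digB_eq, ← apply_ite String.mk, ← apply_ite String.mk]
  have hA := pvALoop_spec a.toList b.toList p hp a.toList.length b.toList.length
    le_rfl le_rfl 0 []
  rw [List.take_length, List.take_length, add_zero, List.append_nil] at hA
  have hB := pvBLoop_spec p (max a.toList.length b.toList.length)
    (pvHorner p a.toList + pvHorner p b.toList) []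
  rw [List.append_nil] at hB
  rw [hA, hB, pvHorner_eq, pvHorner_eq]
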